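-- pv_equiv track=rewrite | github.com/seemanttripathi/Student_Result_Monitoring_System | analysis.py | analysing_results
-- ===== SOURCE A (Python) =====
-- def analysing_results(data):
--     store = []
--     ri_, d_, ab_, ufm_, appeared_ = [], [], [], [], []
--     for j in range(3, len(data[3]) - 1):
--         ri, d, ab, ufm, appeared = 0, 0, 0, 0, 0
--         for i in range(9, len(data)):
--             if data[i][j] == 'RI':
--                 ri += 1
--             elif data[i][j] == 'D':
--                 d += 1
--             elif data[i][j] == 'AB':
--                 ab += 1
--             elif data[i][j] == 'UFM':
--                 ufm += 1
--             if data[i][j] != 'AB' and data[i][j] != 'D':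
--                 appeared += 1
--
--         ri_.append(ri)
--         d_.append(d)
--         ab_.append(ab)
--         ufm_.append(ufm)
--         appeared_.append(appeared)
--     ri_.append(0)
--     d_.append(0)
--     ab_.append(0)
--     ufm_.append(0)
--     appeared_.append(0)
--     for i in range(9, len(data)):
--         if 'RI' in data[i]:
--             ri_[-1] += 1
--         if 'D' in data[i]:
--             d_[-1] += 1
--         if 'AB' in data[i]:
--             ab_[-1] += 1
--         if 'UFM' in data[i]:
--             ufm_[-1] += 1
--     return True, [ri_, d_, ab_, ufm_, appeared_]
-- ===== SOURCE B (Python) =====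
-- def analysing_results(data):
--     rows = data[9:]
--     n = len(rows)
--     cols = [[row[j] for row in rows] for j in range(3, len(data[3]) - 1)]
--     ri_ = [col.count('RI') for col in cols] + [sum('RI' in row for row in rows)]
--     d_ = [col.count('D') for col in cols] + [sum('D' in row for row in rows)]
--     ab_ = [col.count('AB') for col in cols] + [sum('AB' in row for row in rows)]
--     ufm_ = [col.count('UFM') for col in cols] + [sum('UFM' in row for row in rows)]
--     appeared_ = [n - col.count('D') - col.count('AB') for col in cols] + [0]
--     return True, [ri_, d_, ab_, ufm_, appeared_]
-- ===== Notes on version B (the rewrite author's own statement) =====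
-- stated objective: simpler
-- what changed: Replaces the five scalar accumulators with per-column lists built by comprehensions using list.count, derives 'appeared' arithmetically as n - count('D') - count('AB') instead of a per-cell branch, and computes the aggregate last entries directly as membership sums instead of appending 0 and bumping the last element in a second loop.
import Mathlib
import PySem

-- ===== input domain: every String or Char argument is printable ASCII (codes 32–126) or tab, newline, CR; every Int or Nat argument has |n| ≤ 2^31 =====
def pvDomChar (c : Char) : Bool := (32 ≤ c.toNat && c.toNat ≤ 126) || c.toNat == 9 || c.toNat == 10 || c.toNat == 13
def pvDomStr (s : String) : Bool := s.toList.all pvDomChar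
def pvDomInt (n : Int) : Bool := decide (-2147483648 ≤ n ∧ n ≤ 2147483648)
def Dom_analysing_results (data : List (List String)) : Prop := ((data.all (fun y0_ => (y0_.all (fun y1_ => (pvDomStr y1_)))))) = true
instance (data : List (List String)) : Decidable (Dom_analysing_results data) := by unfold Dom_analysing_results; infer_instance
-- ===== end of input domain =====

-- B replaces A's five scalar accumulators by per-column counts (list.count), derives
-- 'appeared' arithmetically as n - count 'D' - count 'AB', and computes the aggregate
-- last entries as membership sums instead of a second bump-the-last-element loop (objective: simpler).

-- ===== PORT A =====
-- data[i][j] / data[3]: in-range by Pre_; ported with pyGetD/pyGet?.getD (exact under Pre_).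
def pvIncLast : List Int → List Int
  | [] => []
  | [x] => [x + 1]
  | x :: xs => x :: pvIncLast xs

-- body of A's inner per-cell loop (the if/elif chain, then the 'appeared' test)
def pvStepA (c : Int × Int × Int × Int × Int) (cell : String) : Int × Int × Int × Int × Int :=
  let t :=
    if cell = "RI" then (c.1 + 1, c.2.1, c.2.2.1, c.2.2.2.1)
    else if cell = "D" then (c.1, c.2.1 + 1, c.2.2.1, c.2.2.2.1)
    else if cell = "AB" then (c.1, c.2.1, c.2.2.1 + 1, c.2.2.2.1)
    else if cell = "UFM" then (c.1, c.2.1, c.2.2.1, c.2.2.2.1 + 1)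
    else (c.1, c.2.1, c.2.2.1, c.2.2.2.1)
  let ap := if cell ≠ "AB" ∧ cell ≠ "D" then c.2.2.2.2 + 1 else c.2.2.2.2
  (t.1, t.2.1, t.2.2.1, t.2.2.2, ap)

-- body of A's final loop ('RI' in data[i] → ri_[-1] += 1, …)
def pvStepMem (acc : List Int × List Int × List Int × List Int) (row : List String) :
    List Int × List Int × List Int × List Int :=
  let ri_ := if "RI" ∈ row then pvIncLast acc.1 else acc.1
  let d_ := if "D" ∈ row then pvIncLast acc.2.1 else acc.2.1
  let ab_ := if "AB" ∈ row then pvIncLast acc.2.2.1 else acc.2.2.1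
  let ufm_ := if "UFM" ∈ row then pvIncLast acc.2.2.2 else acc.2.2.2
  (ri_, d_, ab_, ufm_)

def analysing_results (data : List (List String)) : Bool × List (List Int) :=
  let acc5 :=
    (PySem.List.pyRange 3 (PySem.List.len ((PySem.List.pyGet? data 3).getD []) - 1) 1).foldl
      (fun (acc : List Int × List Int × List Int × List Int × List Int) j =>
        let stats :=
          (PySem.List.pyRange 9 (PySem.List.len data) 1).foldl
            (fun c i => pvStepA c (PySem.List.pyGetD (PySem.List.pyGetD data i []) j ""))
            ((0, 0, 0, 0, 0) : Int × Int × Int × Int × Int)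
        (acc.1 ++ [stats.1], acc.2.1 ++ [stats.2.1], acc.2.2.1 ++ [stats.2.2.1],
         acc.2.2.2.1 ++ [stats.2.2.2.1], acc.2.2.2.2 ++ [stats.2.2.2.2]))
      (([], [], [], [], []) : List Int × List Int × List Int × List Int × List Int)
  let ri_ := acc5.1 ++ [(0 : Int)]
  let d_ := acc5.2.1 ++ [(0 : Int)]
  let ab_ := acc5.2.2.1 ++ [(0 : Int)]
  let ufm_ := acc5.2.2.2.1 ++ [(0 : Int)]
  let appeared_ := acc5.2.2.2.2 ++ [(0 : Int)]
  let acc4 :=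
    (PySem.List.pyRange 9 (PySem.List.len data) 1).foldl
      (fun acc i => pvStepMem acc (PySem.List.pyGetD data i []))
      (ri_, d_, ab_, ufm_)
  (true, [acc4.1, acc4.2.1, acc4.2.2.1, acc4.2.2.2, appeared_])

-- ===== PORT B =====
def analysing_results_alt (data : List (List String)) : Bool × List (List Int) :=
  let rows := PySem.List.slice data (some 9) none
  let n : Int := PySem.List.len rows
  let cols :=
    (PySem.List.pyRange 3 (PySem.List.len ((PySem.List.pyGet? data 3).getD []) - 1) 1).map
      (fun j => rows.map (fun row => PySem.List.pyGetD row j ""))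
  let memSum (s : String) : Int := (rows.map (fun row => if s ∈ row then (1 : Int) else 0)).sum
  let ri_ := cols.map (fun col => (PySem.List.count col "RI" : Int)) ++ [memSum "RI"]
  let d_ := cols.map (fun col => (PySem.List.count col "D" : Int)) ++ [memSum "D"]
  let ab_ := cols.map (fun col => (PySem.List.count col "AB" : Int)) ++ [memSum "AB"]
  let ufm_ := cols.map (fun col => (PySem.List.count col "UFM" : Int)) ++ [memSum "UFM"]
  let appeared_ :=
    cols.map (fun col => n - (PySem.List.count col "D" : Int) - (PySem.List.count col "AB" : Int))
      ++ [(0 : Int)]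
  (true, [ri_, d_, ab_, ufm_, appeared_])

-- ===== PRECONDITION & SPEC =====
-- Pre_ excludes exactly the inputs where Python A raises IndexError: fewer than 4 rows
-- (data[3]), or some scanned row shorter than the scanned column range data[i][j].
def Pre_analysing_results (data : List (List String)) : Prop :=
  4 ≤ data.length ∧
    (5 ≤ (data.getD 3 []).length →
      ∀ row ∈ data.drop 9, (data.getD 3 []).length - 1 ≤ row.length)
instance (data : List (List String)) : Decidable (Pre_analysing_results data) := by
  unfold Pre_analysing_results; infer_instance

def pvWitness_analysing_results : List (List String) :=
  [["a"], [], [], ["x", "y", "z", "M1", "M2", "T"], [], [], [], [], [],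
   ["1", "n", "r", "RI", "45", "ok"], ["2", "n", "r", "AB", "D", "ok"]]

def Spec_analysing_results (data : List (List String)) (out : Bool × List (List Int)) : Prop :=
  out = analysing_results_alt data
instance (data : List (List String)) (out : Bool × List (List Int)) :
    Decidable (Spec_analysing_results data out) := by unfold Spec_analysing_results; infer_instance

-- ===== CLAIM (what is proved, stated in full; the proofs are below) =====
def Claim_equal_analysing_results : Prop :=
  ∀ (data : List (List String)), Dom_analysing_results data → Pre_analysing_results data →
    Spec_analysing_results data (analysing_results data)

-- ===== LEMMAS AND PROOFS =====

-- pvIncLast bumps exactly the appended last element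
theorem pvIncLast_append (l : List Int) (x : Int) : pvIncLast (l ++ [x]) = l ++ [x + 1] := by
  induction l with
  | nil => rfl
  | cons y l ih =>
    cases l with
    | nil => simp [pvIncLast]
    | cons z l => simpa [pvIncLast] using ih

-- A's per-cell fold over a column computes the four counts and length - count D - count AB
theorem foldl_pvStepA (col : List String) (ri d ab ufm ap : Int) :
    col.foldl pvStepA (ri, d, ab, ufm, ap) =
      (ri + col.count "RI", d + col.count "D", ab + col.count "AB", ufm + col.count "UFM",
       ap + ((col.length : Int) - col.count "D" - col.count "AB")) := by
  induction col generalizing ri d ab ufm ap with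
  | nil => simp
  | cons x xs ih =>
    simp only [List.foldl_cons, pvStepA, List.count_cons, List.length_cons]
    split_ifs with h1 h2 h3 h4 h5 <;> rw [ih] <;>
      simp_all [Prod.mk.injEq] <;> and_intros <;> ring

-- fold appending one projection of g j per component = five maps
theorem foldl_append5 (g : Int → Int × Int × Int × Int × Int) (js : List Int)
    (a b c d e : List Int) :
    js.foldl
      (fun (acc : List Int × List Int × List Int × List Int × List Int) j =>
        (acc.1 ++ [(g j).1], acc.2.1 ++ [(g j).2.1], acc.2.2.1 ++ [(g j).2.2.1],
         acc.2.2.2.1 ++ [(g j).2.2.2.1], acc.2.2.2.2 ++ [(g j).2.2.2.2]))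
      (a, b, c, d, e) =
      (a ++ js.map (fun j => (g j).1), b ++ js.map (fun j => (g j).2.1),
       c ++ js.map (fun j => (g j).2.2.1), d ++ js.map (fun j => (g j).2.2.2.1),
       e ++ js.map (fun j => (g j).2.2.2.2)) := by
  induction js generalizing a b c d e with
  | nil => simp
  | cons j js ih => simp [ih]

-- componentwise split of the final membership fold
theorem foldl_pvStepMem (rows : List (List String)) (a b c d : List Int) :
    rows.foldl pvStepMem (a, b, c, d) =
      (rows.foldl (fun l r => if "RI" ∈ r then pvIncLast l else l) a,
       rows.foldl (fun l r => if "D" ∈ r then pvIncLast l else l) b,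
       rows.foldl (fun l r => if "AB" ∈ r then pvIncLast l else l) c,
       rows.foldl (fun l r => if "UFM" ∈ r then pvIncLast l else l) d) := by
  induction rows generalizing a b c d with
  | nil => rfl
  | cons r rows ih => simp [pvStepMem, ih]

-- conditional bump-last fold = last element plus the 0/1 membership sum
theorem foldl_incLast (P : List String → Prop) [DecidablePred P] (rows : List (List String))
    (init : List Int) (k : Int) :
    rows.foldl (fun l r => if P r then pvIncLast l else l) (init ++ [k]) =
      init ++ [k + (rows.map (fun r => if P r then (1 : Int) else 0)).sum] := by
  induction rows generalizing k with
  | nil => simp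
  | cons r rows ih =>
    by_cases h : P r
    · simp only [List.foldl_cons, h, if_pos, pvIncLast_append, ih, List.map_cons, List.sum_cons]
      ring_nf
    · simp only [List.foldl_cons, h, if_neg, not_false_iff, ih, List.map_cons, List.sum_cons]
      simp

-- A's inner per-column index loop = a fold of pvStepA over the j-th column of the scanned rows
theorem inner_drop (data : List (List String)) (j : Int) :
    (PySem.List.pyRange 9 (PySem.List.len data)).foldl
        (fun c i => pvStepA c (PySem.List.pyGetD (PySem.List.pyGetD data i []) j ""))
        ((0, 0, 0, 0, 0) : Int × Int × Int × Int × Int) =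
      ((data.drop 9).map (fun row => PySem.List.pyGetD row j "")).foldl pvStepA
        ((0, 0, 0, 0, 0) : Int × Int × Int × Int × Int) := by
  rw [PySem.List.foldl_pyRange_pyGetD data []
        (fun c row => pvStepA c (PySem.List.pyGetD row j "")) _ (by norm_num)]
  rw [show (Int.toNat 9) = 9 from rfl, List.foldl_map]

-- ===== VERDICT (by name: the statement is the Claim_ definition above) =====
theorem analysing_results_spec : Claim_equal_analysing_results := by
  intro data _ _
  show analysing_results data = analysing_results_alt data
  simp only [analysing_results, analysing_results_alt]
  rw [PySem.List.slice_from data (by norm_num : (0:Int) ≤ 9)]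
  rw [foldl_append5 (fun j =>
        (PySem.List.pyRange 9 (PySem.List.len data)).foldl
          (fun c i => pvStepA c (PySem.List.pyGetD (PySem.List.pyGetD data i []) j ""))
          ((0, 0, 0, 0, 0) : Int × Int × Int × Int × Int))]
  rw [PySem.List.foldl_pyRange_pyGetD data [] pvStepMem _ (by norm_num)]
  simp only [inner_drop, foldl_pvStepA, foldl_pvStepMem]
  rw [foldl_incLast (fun r => "RI" ∈ r), foldl_incLast (fun r => "D" ∈ r),
      foldl_incLast (fun r => "AB" ∈ r), foldl_incLast (fun r => "UFM" ∈ r)]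
  simp [PySem.List.count_eq, PySem.List.len, List.map_map, Function.comp]
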